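-- pv_equiv track=rewrite | github.com/lnatamm/sql-algebra-relacional | classes/heuristica_evitar_joins.py | _encontrar_join_para_tabelas
-- ===== SOURCE A (Python) =====
-- def _encontrar_join_para_tabelas(inner_joins: list, t1: str, t2: str):
-- 	"""Retorna índice do join mais apropriado para associar a condição entre t1 e t2.
--
-- 	Estratégia simples:
-- 	- Se houver um join cuja tabela é exatamente t1 ou t2, retorna esse índice.
-- 	- Caso haja múltiplos, prefere join que já contenha referência à outra tabela
-- 	  na sua condição (sinal que este join conecta as duas tabelas).
-- 	- Senão, retorna a primeira ocorrência.
-- 	"""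
-- 	candidatos = []
-- 	for idx, j in enumerate(inner_joins):
-- 		tabela = j.get('tabela', '')
-- 		if tabela == t1 or tabela == t2:
-- 			candidatos.append((idx, j))
--
-- 	if not candidatos:
-- 		return None
--
-- 	# Se algum candidato já tem condicao que menciona a outra tabela, escolha-o
-- 	for idx, j in candidatos:
-- 		cond = j.get('condicao', '') or ''
-- 		if t1 != j.get('tabela', '') and f"{t1}." in cond:
-- 			return idx
-- 		if t2 != j.get('tabela', '') and f"{t2}." in cond:
-- 			return idx
--
-- 	# Caso padrão: retorna o primeiro candidato
-- 	return candidatos[0][0]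
-- ===== SOURCE B (Python) =====
-- def _encontrar_join_para_tabelas(inner_joins: list, t1: str, t2: str):
--     primeiro = None
--     for idx, j in enumerate(inner_joins):
--         tabela = j.get('tabela', '')
--         if tabela != t1 and tabela != t2:
--             continue
--         cond = j.get('condicao', '') or ''
--         if (t1 != tabela and f"{t1}." in cond) or (t2 != tabela and f"{t2}." in cond):
--             return idx
--         if primeiro is None:
--             primeiro = idx
--     return primeiro
-- ===== Notes on version B (the rewrite author's own statement) =====
-- stated objective: simpler
-- what changed: Replaces A's two-phase structure (build a candidate list of all joins matching t1/t2, then scan that list and finally index its head) with a single pass over inner_joins that returns immediately on a candidate whose condition mentions the other table and otherwise just remembers the first candidate index as fallback.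
import Mathlib
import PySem

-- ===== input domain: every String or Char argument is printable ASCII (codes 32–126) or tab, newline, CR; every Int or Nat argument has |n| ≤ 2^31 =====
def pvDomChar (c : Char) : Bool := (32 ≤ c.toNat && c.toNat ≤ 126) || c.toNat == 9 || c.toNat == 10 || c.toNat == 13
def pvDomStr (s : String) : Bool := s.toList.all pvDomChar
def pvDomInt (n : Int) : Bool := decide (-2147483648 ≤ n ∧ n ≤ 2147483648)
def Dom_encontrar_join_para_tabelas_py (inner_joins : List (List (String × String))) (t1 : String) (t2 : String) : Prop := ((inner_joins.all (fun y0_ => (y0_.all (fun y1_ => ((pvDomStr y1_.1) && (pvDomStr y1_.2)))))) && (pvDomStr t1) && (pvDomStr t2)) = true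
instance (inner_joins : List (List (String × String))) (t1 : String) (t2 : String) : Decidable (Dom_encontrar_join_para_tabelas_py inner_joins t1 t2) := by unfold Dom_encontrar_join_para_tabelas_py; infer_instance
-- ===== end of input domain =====

-- B replaces A's two-phase candidate-list-then-scan structure with a single pass that
-- returns on the first candidate mentioning the other table and remembers only the
-- first candidate index as fallback (objective: simpler; same asymptotic cost).

-- j.get(k, dflt): first-match lookup in the association list (the dict convention)
def pvGetD (j : List (String × String)) (k dflt : String) : String :=
  (j.lookup k).getD dflt

-- ===== PORT A =====
-- first loop of A: collect (idx, j) for every join whose 'tabela' is t1 or t2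
def pvA_candidatos (t1 t2 : String) : List (List (String × String)) → Int → List (Int × List (String × String))
  | [], _ => []
  | j :: rest, idx =>
      let tabela := pvGetD j "tabela" ""
      if tabela = t1 ∨ tabela = t2 then (idx, j) :: pvA_candidatos t1 t2 rest (idx + 1)
      else pvA_candidatos t1 t2 rest (idx + 1)

-- second loop of A: first candidate whose condition mentions the other table
def pvA_scan (t1 t2 : String) : List (Int × List (String × String)) → Option Int
  | [] => none
  | (idx, j) :: rest =>
      let cond' := pvGetD j "condicao" ""
      let cond := if cond' = "" then "" else cond'   -- `or ''`
      if t1 ≠ pvGetD j "tabela" "" ∧ PySem.Str.isIn (t1 ++ ".") cond = true then some idx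
      else if t2 ≠ pvGetD j "tabela" "" ∧ PySem.Str.isIn (t2 ++ ".") cond = true then some idx
      else pvA_scan t1 t2 rest

def encontrar_join_para_tabelas_py (inner_joins : List (List (String × String))) (t1 : String) (t2 : String) : Option Int :=
  match pvA_candidatos t1 t2 inner_joins 0 with
  | [] => none
  | (idx0, j0) :: rest =>
      match pvA_scan t1 t2 ((idx0, j0) :: rest) with
      | some idx => some idx
      | none => some idx0      -- candidatos[0][0]

-- ===== PORT B =====
-- single pass: return at once on a mentioning candidate, else remember the first candidate
def pvB_loop (t1 t2 : String) : List (List (String × String)) → Int → Option Int → Option Int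
  | [], _, primeiro => primeiro
  | j :: rest, idx, primeiro =>
      let tabela := pvGetD j "tabela" ""
      if tabela ≠ t1 ∧ tabela ≠ t2 then pvB_loop t1 t2 rest (idx + 1) primeiro
      else
        let cond' := pvGetD j "condicao" ""
        let cond := if cond' = "" then "" else cond'   -- `or ''`
        if (t1 ≠ tabela ∧ PySem.Str.isIn (t1 ++ ".") cond = true) ∨
           (t2 ≠ tabela ∧ PySem.Str.isIn (t2 ++ ".") cond = true) then some idx
        else pvB_loop t1 t2 rest (idx + 1) (match primeiro with | none => some idx | some p => some p)

def encontrar_join_para_tabelas_py_alt (inner_joins : List (List (String × String))) (t1 : String) (t2 : String) : Option Int :=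
  pvB_loop t1 t2 inner_joins 0 none

-- ===== PRECONDITION & SPEC =====
def Spec_encontrar_join_para_tabelas_py (inner_joins : List (List (String × String))) (t1 : String) (t2 : String) (out : Option Int) : Prop := out = encontrar_join_para_tabelas_py_alt inner_joins t1 t2
instance (inner_joins : List (List (String × String))) (t1 : String) (t2 : String) (out : Option Int) : Decidable (Spec_encontrar_join_para_tabelas_py inner_joins t1 t2 out) := by unfold Spec_encontrar_join_para_tabelas_py; infer_instance

-- ===== CLAIM (what is proved, stated in full; the proofs are below) =====
def Claim_equal_encontrar_join_para_tabelas_py : Prop := ∀ (inner_joins : List (List (String × String))) (t1 : String) (t2 : String), Dom_encontrar_join_para_tabelas_py inner_joins t1 t2 → Spec_encontrar_join_para_tabelas_py inner_joins t1 t2 (encontrar_join_para_tabelas_py inner_joins t1 t2)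

-- ===== LEMMAS AND PROOFS =====

-- B's loop against A's two phases, for any start index and remembered fallback
theorem pvB_loop_eq (t1 t2 : String) (lst : List (List (String × String))) :
    ∀ (idx : Int) (primeiro : Option Int),
      pvB_loop t1 t2 lst idx primeiro =
        match pvA_scan t1 t2 (pvA_candidatos t1 t2 lst idx) with
        | some i => some i
        | none =>
            match primeiro with
            | some p => some p
            | none => (pvA_candidatos t1 t2 lst idx).head?.map (·.1) := by
  induction lst with
  | nil => intro idx primeiro; cases primeiro <;> simp [pvB_loop, pvA_candidatos, pvA_scan]
  | cons j rest ih =>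
      intro idx primeiro
      simp only [pvB_loop, pvA_candidatos]
      by_cases hc : pvGetD j "tabela" "" = t1 ∨ pvGetD j "tabela" "" = t2
      · have hnc : ¬ (pvGetD j "tabela" "" ≠ t1 ∧ pvGetD j "tabela" "" ≠ t2) := by tauto
        simp only [if_pos hc, if_neg hnc]
        by_cases hm : (t1 ≠ pvGetD j "tabela" "" ∧
              PySem.Str.isIn (t1 ++ ".") (if pvGetD j "condicao" "" = "" then "" else pvGetD j "condicao" "") = true) ∨
            (t2 ≠ pvGetD j "tabela" "" ∧
              PySem.Str.isIn (t2 ++ ".") (if pvGetD j "condicao" "" = "" then "" else pvGetD j "condicao" "") = true)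
        · simp only [if_pos hm, pvA_scan]
          rcases hm with hm | hm
          · rw [if_pos hm]
          · by_cases hm1 : (t1 ≠ pvGetD j "tabela" "" ∧
                PySem.Str.isIn (t1 ++ ".") (if pvGetD j "condicao" "" = "" then "" else pvGetD j "condicao" "") = true)
            · rw [if_pos hm1]
            · rw [if_neg hm1, if_pos hm]
        · have h1 : ¬ (t1 ≠ pvGetD j "tabela" "" ∧
              PySem.Str.isIn (t1 ++ ".") (if pvGetD j "condicao" "" = "" then "" else pvGetD j "condicao" "") = true) := by tauto
          have h2 : ¬ (t2 ≠ pvGetD j "tabela" "" ∧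
              PySem.Str.isIn (t2 ++ ".") (if pvGetD j "condicao" "" = "" then "" else pvGetD j "condicao" "") = true) := by tauto
          simp only [if_neg hm, pvA_scan, if_neg h1, if_neg h2]
          rw [ih]
          cases primeiro <;> simp
      · have hnc : pvGetD j "tabela" "" ≠ t1 ∧ pvGetD j "tabela" "" ≠ t2 := by tauto
        simp only [if_neg hc, if_pos hnc]
        exact ih (idx + 1) primeiro

-- ===== VERDICT (by name: the statement is the Claim_ definition above) =====
theorem encontrar_join_para_tabelas_py_spec : Claim_equal_encontrar_join_para_tabelas_py := by
  intro inner_joins t1 t2 _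
  unfold Spec_encontrar_join_para_tabelas_py encontrar_join_para_tabelas_py encontrar_join_para_tabelas_py_alt
  rw [pvB_loop_eq]
  cases h : pvA_candidatos t1 t2 inner_joins 0 with
  | nil => simp [pvA_scan]
  | cons c rest =>
      obtain ⟨idx0, j0⟩ := c
      cases hs : pvA_scan t1 t2 ((idx0, j0) :: rest) <;> simp [hs]
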